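-- pv_equiv track=rewrite | github.com/jvcavancini/SO-Trabalho1 | trabalho1.py | procura_ultimo_elemento
-- ===== SOURCE A (Python) =====
-- def procura_ultimo_elemento(references, locais_RAM):
--   posicao_processo=[-1]*len(locais_RAM)
--
--   #confere se algum elemento da lista não se repete mais no resto do processo
--   #caso algum não se repita, ele é o elemento retirado
--   for i in locais_RAM:
--     try:
--       references.index(i)
--     except ValueError:
--       return i
--
--   #caso todos os elementos vão se repetir em algum momento, procura o último a se repetir
--   for i in range(0,len(locais_RAM)):
--     posicao_processo[i]=references.index(locais_RAM[i])
--   return locais_RAM[posicao_processo.index(max(posicao_processo))]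
-- ===== SOURCE B (Python) =====
-- def procura_ultimo_elemento(references, locais_RAM):
--     # index of the first occurrence of each value in references, built in one pass
--     pos = {}
--     for j, x in enumerate(references):
--         if x not in pos:
--             pos[x] = j
--     best_x = None
--     best_j = -1
--     for x in locais_RAM:
--         if x not in pos:
--             return x
--         j = pos[x]
--         if j > best_j:
--             best_j = j
--             best_x = x
--     if best_x is None:
--         raise ValueError("locais_RAM is empty")
--     return best_x
-- ===== Notes on version B (the rewrite author's own statement) =====
-- stated objective: alternative
-- what changed: Replaces A's repeated references.index scans (a membership probe per element, then a second pass of .index calls plus a max/index pass over the position list) by a first-occurrence index dict built in one pass over references followed by a single running-argmax pass over locais_RAM.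
import Mathlib
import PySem

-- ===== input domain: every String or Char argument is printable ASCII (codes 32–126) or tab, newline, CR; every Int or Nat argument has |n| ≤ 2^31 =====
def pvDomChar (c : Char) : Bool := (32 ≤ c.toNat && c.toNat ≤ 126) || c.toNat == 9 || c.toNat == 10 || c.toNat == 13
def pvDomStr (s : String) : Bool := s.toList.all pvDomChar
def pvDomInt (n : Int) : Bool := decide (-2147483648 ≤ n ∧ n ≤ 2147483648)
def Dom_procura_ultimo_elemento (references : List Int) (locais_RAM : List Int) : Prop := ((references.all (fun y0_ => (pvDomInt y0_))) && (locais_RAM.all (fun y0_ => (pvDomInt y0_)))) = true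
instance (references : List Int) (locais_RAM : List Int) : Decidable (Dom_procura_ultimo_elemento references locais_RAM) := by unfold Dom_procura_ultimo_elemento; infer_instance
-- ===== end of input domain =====

-- B replaces A's repeated references.index scans by a first-occurrence dict built once
-- plus a single running-argmax pass over locais_RAM (alternative algorithm, same result).


-- ===== PORT A =====
-- first loop: return the first element of locais_RAM absent from references (references.index raising ValueError)
def pyA_firstAbsent (references : List Int) : List Int → Option Int
  | [] => none
  | i :: rest =>
    match PySem.List.index? references i with
    | some _ => pyA_firstAbsent references rest
    | none => some i

def procura_ultimo_elemento (references : List Int) (locais_RAM : List Int) : Int :=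
  match pyA_firstAbsent references locais_RAM with
  | some i => i
  | none =>
    -- posicao_processo = [-1]*len, then posicao_processo[i] = references.index(locais_RAM[i])
    -- (that index call cannot raise here: the first loop found every element; default -1 is unreachable)
    let posicao := (PySem.List.pyRange 0 (locais_RAM.length : Int) 1).foldl
      (fun acc i => PySem.List.pySetD acc i
        (((PySem.List.index? references (PySem.List.pyGetD locais_RAM i (-1))).map (fun k => (k : Int))).getD (-1)))
      (List.replicate locais_RAM.length (-1))
    match PySem.List.max? posicao (fun y => y) with
    | none => 0  -- max([]) raises ValueError in Python: excluded by Pre_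
    | some m =>
      match PySem.List.index? posicao m with
      | some k => PySem.List.pyGetD locais_RAM (k : Int) 0
      | none => 0  -- unreachable: m is an element of posicao

-- ===== PORT B =====
-- second loop of Source B: early return on a missing key, else running argmax (strictly greater updates)
def pyB_loop (pos : PySem.Dict Int Int) : List Int → Option Int → Int → Int
  | [], bestX, _ => bestX.getD 0  -- best_x is None only for empty locais_RAM (raise ValueError): excluded by Pre_
  | x :: rest, bestX, bestJ =>
    match PySem.Dict.get? pos x with
    | none => x
    | some j => if j > bestJ then pyB_loop pos rest (some x) j else pyB_loop pos rest bestX bestJ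

def procura_ultimo_elemento_alt (references : List Int) (locais_RAM : List Int) : Int :=
  let pos := (PySem.List.enumerate references 0).foldl
    (fun d p => if PySem.Dict.contains d p.2 then d else PySem.Dict.insert d p.2 p.1)
    PySem.Dict.empty
  pyB_loop pos locais_RAM none (-1)

-- ===== PRECONDITION & SPEC =====
-- Pre_ excludes empty locais_RAM, on which A raises ValueError (max of an empty sequence).
def Pre_procura_ultimo_elemento (references : List Int) (locais_RAM : List Int) : Prop := locais_RAM ≠ []
instance (references : List Int) (locais_RAM : List Int) : Decidable (Pre_procura_ultimo_elemento references locais_RAM) := by unfold Pre_procura_ultimo_elemento; infer_instance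

def pvWitness_procura_ultimo_elemento : List Int × List Int := ([1, 2, 3], [2, 1])

def Spec_procura_ultimo_elemento (references : List Int) (locais_RAM : List Int) (out : Int) : Prop := out = procura_ultimo_elemento_alt references locais_RAM
instance (references : List Int) (locais_RAM : List Int) (out : Int) : Decidable (Spec_procura_ultimo_elemento references locais_RAM out) := by unfold Spec_procura_ultimo_elemento; infer_instance

-- ===== CLAIM (what is proved, stated in full; the proofs are below) =====
def Claim_equal_procura_ultimo_elemento : Prop := ∀ (references : List Int) (locais_RAM : List Int), Dom_procura_ultimo_elemento references locais_RAM → Pre_procura_ultimo_elemento references locais_RAM → Spec_procura_ultimo_elemento references locais_RAM (procura_ultimo_elemento references locais_RAM)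

-- ===== LEMMAS AND PROOFS =====

-- the first-occurrence index of x in refs, as A's posicao entries compute it (-1 unreachable when x ∈ refs)
def pvIdx (references : List Int) (x : Int) : Int :=
  ((PySem.List.index? references x).map (fun k => (k : Int))).getD (-1)

lemma pv_idx_nonneg {references : List Int} {x : Int} (h : x ∈ references) : 0 ≤ pvIdx references x := by
  have h' := (PySem.List.index?_isSome_iff references x).mpr h
  rcases Option.isSome_iff_exists.mp h' with ⟨k, hk⟩
  unfold pvIdx
  rw [hk]
  simp

-- characterisation of the dict Source B builds
lemma pv_build (references : List Int) : ∀ (s : Int) (d : PySem.Dict Int Int) (y : Int),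
    PySem.Dict.get? ((PySem.List.enumerate references s).foldl
      (fun d p => if PySem.Dict.contains d p.2 then d else PySem.Dict.insert d p.2 p.1) d) y
    = Option.or (PySem.Dict.get? d y) ((PySem.List.index? references y).map (fun k => (k : Int) + s)) := by
  induction references with
  | nil => intro s d y; simp [PySem.List.enumerate_nil, PySem.List.index?_eq_idxOf?]
  | cons x rest ih =>
    intro s d y
    rw [PySem.List.enumerate_cons]
    simp only [List.foldl_cons]
    rw [ih]
    by_cases hc : PySem.Dict.contains d x = true
    · simp only [hc, if_true]
      cases hg : PySem.Dict.get? d y with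
      | some v => simp [Option.or]
      | none =>
        have hxy : x ≠ y := by
          intro h; subst h
          rw [PySem.Dict.contains_eq_isSome_get?, hg] at hc; simp at hc
        rw [PySem.List.index?_cons_of_ne rest hxy]
        cases PySem.List.index? rest y with
        | none => rfl
        | some a => simp; omega
    · have hc' : PySem.Dict.contains d x = false := by simpa using hc
      simp only [hc', Bool.false_eq_true, if_false]
      by_cases hxy : y = x
      · subst hxy
        rw [PySem.Dict.get?_insert_self]
        have hg : PySem.Dict.get? d y = none := by
          rw [PySem.Dict.contains_eq_isSome_get?] at hc'
          cases h : PySem.Dict.get? d y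
          · rfl
          · rw [h] at hc'; simp at hc'
        rw [hg, PySem.List.index?_cons_self]
        simp [Option.or]
      · rw [PySem.Dict.get?_insert_of_ne d s hxy]
        cases hg : PySem.Dict.get? d y with
        | some v => simp [Option.or]
        | none =>
          rw [PySem.List.index?_cons_of_ne rest (fun h => hxy h.symm)]
          cases PySem.List.index? rest y with
          | none => rfl
          | some a => simp; omega

lemma pv_pos_get? (references : List Int) (y : Int) :
    PySem.Dict.get? ((PySem.List.enumerate references 0).foldl
      (fun d p => if PySem.Dict.contains d p.2 then d else PySem.Dict.insert d p.2 p.1) PySem.Dict.empty) y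
    = (PySem.List.index? references y).map (fun k => (k : Int)) := by
  rw [pv_build]
  simp [PySem.Dict.get?_empty, Option.or]

-- first loop of A returns none iff every element is present
lemma pv_firstAbsent_none (references : List Int) : ∀ (L : List Int),
    pyA_firstAbsent references L = none ↔ ∀ x ∈ L, x ∈ references := by
  intro L
  induction L with
  | nil => simp [pyA_firstAbsent]
  | cons x t ih =>
    cases hix : PySem.List.index? references x with
    | none =>
      have hxnot : x ∉ references := (PySem.List.index?_eq_none_iff references x).mp hix
      simp only [pyA_firstAbsent, hix]
      constructor
      · intro h; simp at h
      · intro h; exact absurd (h x (by simp)) hxnot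
    | some n =>
      have hxin : x ∈ references := (PySem.List.index?_isSome_iff references x).mp (by rw [hix]; rfl)
      simp only [pyA_firstAbsent, hix, ih]
      constructor
      · intro h y hy
        rcases List.mem_cons.mp hy with rfl | hy'
        · exact hxin
        · exact h y hy'
      · intro h y hy; exact h y (List.mem_cons_of_mem _ hy)

-- case 1: A returns the first absent element; B's loop does too
lemma pv_loop_absent (references : List Int) (pos : PySem.Dict Int Int)
    (hpos : ∀ y, PySem.Dict.get? pos y = (PySem.List.index? references y).map (fun k => (k : Int))) :
    ∀ (L : List Int) (b : Option Int) (j i : Int),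
    pyA_firstAbsent references L = some i → pyB_loop pos L b j = i := by
  intro L
  induction L with
  | nil => intro b j i h; simp [pyA_firstAbsent] at h
  | cons x t ih =>
    intro b j i h
    simp only [pyA_firstAbsent] at h
    cases hix : PySem.List.index? references x with
    | none =>
      rw [hix] at h
      have hxi : x = i := by simpa using h
      subst hxi
      simp only [PySem.List.index?_eq_idxOf?] at hix
      simp [pyB_loop, hpos x, hix]
    | some n =>
      rw [hix] at h
      replace h : pyA_firstAbsent references t = some i := h
      simp only [PySem.List.index?_eq_idxOf?] at hix
      simp [pyB_loop, hpos x, hix]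
      split <;> exact ih _ _ _ h

-- running max: helper facts
lemma pv_foldl_max_const : ∀ (l : List Int) (a : Int), (∀ y ∈ l, y ≤ a) → l.foldl max a = a := by
  intro l
  induction l with
  | nil => intro a _; rfl
  | cons x t ih =>
    intro a h
    simp only [List.foldl_cons]
    have hx : max a x = a := max_eq_left (h x (by simp))
    rw [hx]
    exact ih a (fun y hy => h y (by simp [hy]))

lemma pv_le_foldl_max : ∀ (l : List Int) (a y : Int), y ∈ l → y ≤ l.foldl max a := by
  intro l
  induction l with
  | nil => intro a y h; simp at h
  | cons x t ih =>
    intro a y h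
    simp only [List.foldl_cons]
    rcases List.mem_cons.mp h with rfl | h'
    · by_cases ht : ∀ z ∈ t, z ≤ max a y
      · rw [pv_foldl_max_const t _ ht]; exact le_max_right a y
      · push Not at ht
        rcases ht with ⟨z, hz, _⟩
        calc y ≤ max a y := le_max_right a y
        _ ≤ t.foldl max (max a y) := by
            by_cases h2 : ∀ w ∈ t, w ≤ max a y
            · rw [pv_foldl_max_const t _ h2]
            · push Not at h2
              rcases h2 with ⟨w, hw, hw2⟩
              exact le_trans (le_of_lt hw2) (ih _ w hw)
    · exact ih _ y h'

-- exhausted loop: nothing beats bestJ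
lemma pv_loop_exhaust (pos : PySem.Dict Int Int) (g : Int → Int) :
    ∀ (L : List Int) (b : Option Int) (j : Int),
    (∀ x ∈ L, PySem.Dict.get? pos x = some (g x)) → (∀ x ∈ L, g x ≤ j) →
    pyB_loop pos L b j = b.getD 0 := by
  intro L
  induction L with
  | nil => intro b j _ _; rfl
  | cons x t ih =>
    intro b j hsome hle
    simp only [pyB_loop, hsome x (by simp)]
    have : ¬ g x > j := not_lt.mpr (hle x (by simp))
    simp only [this, if_false]
    exact ih b j (fun y hy => hsome y (by simp [hy])) (fun y hy => hle y (by simp [hy]))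

-- B's loop computes the first element attaining the running maximum
lemma pv_loop_eq (pos : PySem.Dict Int Int) (g : Int → Int) :
    ∀ (L : List Int) (b : Option Int) (j : Int),
    (∀ x ∈ L, PySem.Dict.get? pos x = some (g x)) → (∃ x ∈ L, j < g x) →
    pyB_loop pos L b j = (L.find? (fun x => g x == (L.map g).foldl max j)).getD 0 := by
  intro L
  induction L with
  | nil => intro b j _ hex; simp at hex
  | cons x t ih =>
    intro b j hsome hex
    have hsx := hsome x (by simp)
    have hsome' : ∀ y ∈ t, PySem.Dict.get? pos y = some (g y) := fun y hy => hsome y (by simp [hy])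
    simp only [pyB_loop, hsx, List.map_cons, List.foldl_cons, List.find?_cons]
    by_cases hx : j < g x
    · simp only [gt_iff_lt, hx, if_true]
      have hmax : max j (g x) = g x := max_eq_right (le_of_lt hx)
      rw [hmax]
      by_cases hext : ∃ y ∈ t, g x < g y
      · rw [ih (some x) (g x) hsome' hext]
        rcases hext with ⟨y, hy, hlt⟩
        have hyM : g y ≤ (t.map g).foldl max (g x) :=
          pv_le_foldl_max _ _ _ (List.mem_map_of_mem hy)
        have : ¬ (g x == (t.map g).foldl max (g x)) = true := by
          simp only [beq_iff_eq]; omega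
        simp only [this, if_false]
      · push Not at hext
        have hconst : (t.map g).foldl max (g x) = g x := by
          apply pv_foldl_max_const
          intro y hy
          rcases List.mem_map.mp hy with ⟨z, hz, rfl⟩
          exact hext z hz
        rw [pv_loop_exhaust pos g t (some x) (g x) hsome' hext, hconst]
        simp
    · simp only [gt_iff_lt, hx, if_false]
      have hgx : g x ≤ j := not_lt.mp hx
      have hmax : max j (g x) = j := max_eq_left hgx
      rw [hmax]
      have hext : ∃ y ∈ t, j < g y := by
        rcases hex with ⟨y, hy, hlt⟩
        rcases List.mem_cons.mp hy with rfl | hy'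
        · omega
        · exact ⟨y, hy', hlt⟩
      rw [ih b j hsome' hext]
      rcases hext with ⟨y, hy, hlt⟩
      have hyM : g y ≤ (t.map g).foldl max j := pv_le_foldl_max _ _ _ (List.mem_map_of_mem hy)
      have : ¬ (g x == (t.map g).foldl max j) = true := by
        simp only [beq_iff_eq]; omega
      simp only [this, if_false]

-- the posicao list of A is the map of first-occurrence indices
lemma pv_set_append : ∀ (l1 l2 : List Int) (a v : Int), (l1 ++ a :: l2).set l1.length v = l1 ++ v :: l2 := by
  intro l1
  induction l1 with
  | nil => intro l2 a v; rfl
  | cons x t ih => intro l2 a v; simp [List.set, ih]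

lemma pv_pos_build (h : Int → Int) (L : List Int) : ∀ (n : ℕ), n ≤ L.length →
    (PySem.List.pyRange 0 (n : Int) 1).foldl
      (fun acc i => PySem.List.pySetD acc i (h (PySem.List.pyGetD L i (-1))))
      (List.replicate L.length (-1))
    = (L.take n).map h ++ List.replicate (L.length - n) (-1) := by
  intro n
  induction n with
  | zero => intro _; rw [PySem.List.pyRange_one_eq_nil (by norm_num)]; simp
  | succ n ih =>
    intro hle
    have hn : n < L.length := by omega
    have hcast : ((n + 1 : ℕ) : Int) = (n : Int) + 1 := by push_cast; ring
    rw [hcast, PySem.List.pyRange_one_succ_right (Int.natCast_nonneg n), List.foldl_append]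
    rw [ih (by omega)]
    simp only [List.foldl_cons, List.foldl_nil]
    rw [PySem.List.pyGetD_natCast, PySem.List.pySetD_natCast]
    rw [List.getD_eq_getElem?_getD, List.getElem?_eq_getElem hn]
    simp only [Option.getD_some]
    have hrep : List.replicate (L.length - n) (-1 : Int) = (-1 : Int) :: List.replicate (L.length - (n + 1)) (-1) := by
      have : L.length - n = (L.length - (n + 1)) + 1 := by omega
      rw [this, List.replicate_succ]
    rw [hrep]
    have hlen : ((L.take n).map h).length = n := by simp [List.length_take, Nat.min_eq_left (le_of_lt hn)]
    have key := pv_set_append ((L.take n).map h) (List.replicate (L.length - (n + 1)) (-1)) (-1) (h L[n])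
    rw [hlen] at key
    rw [key]
    have htake : List.take (n + 1) L = List.take n L ++ [L[n]] := by
      rw [List.take_add_one, List.getElem?_eq_getElem hn]; rfl
    rw [htake, List.map_append, List.append_assoc]
    rfl

lemma pv_posicao (references : List Int) (L : List Int) :
    (PySem.List.pyRange 0 (L.length : Int) 1).foldl
      (fun acc i => PySem.List.pySetD acc i
        (((PySem.List.index? references (PySem.List.pyGetD L i (-1))).map (fun k => (k : Int))).getD (-1)))
      (List.replicate L.length (-1))
    = L.map (pvIdx references) := by
  have h := pv_pos_build (pvIdx references) L L.length (le_refl _)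
  simp only [List.take_length, Nat.sub_self, List.replicate_zero, List.append_nil] at h
  exact h

-- locais_RAM[(map g L).index(M)] is the first element with g x = M
lemma pv_index_map_find (g : Int → Int) : ∀ (L : List Int) (M : Int) (k : ℕ),
    PySem.List.index? (L.map g) M = some k →
    PySem.List.pyGetD L (k : Int) 0 = (L.find? (fun x => g x == M)).getD 0 := by
  intro L
  induction L with
  | nil => intro M k h; simp [PySem.List.index?_eq_idxOf?] at h
  | cons x t ih =>
    intro M k h
    simp only [List.map_cons] at h
    by_cases hgx : g x = M
    · rw [hgx, PySem.List.index?_cons_self] at h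
      have hk : k = 0 := by simpa using h.symm
      subst hk
      rw [PySem.List.pyGetD_natCast]
      simp [List.find?_cons, hgx]
    · rw [PySem.List.index?_cons_of_ne (t.map g) hgx] at h
      rcases Option.map_eq_some_iff.mp h with ⟨k', hk', rfl⟩
      rw [PySem.List.pyGetD_natCast, List.getD_cons_succ, ← PySem.List.pyGetD_natCast t k' 0]
      rw [List.find?_cons]
      have hne : ¬ (g x == M) = true := by simp [hgx]
      simp only [hne, if_false]
      exact ih M k' hk'

-- ===== VERDICT (by name: the statement is the Claim_ definition above) =====
theorem procura_ultimo_elemento_spec : Claim_equal_procura_ultimo_elemento := by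
  unfold Claim_equal_procura_ultimo_elemento
  intro references locais_RAM _ hpre
  unfold Spec_procura_ultimo_elemento
  unfold Pre_procura_ultimo_elemento at hpre
  simp only [procura_ultimo_elemento, procura_ultimo_elemento_alt]
  have hpos := pv_pos_get? references
  cases hfa : pyA_firstAbsent references locais_RAM with
  | some i =>
    rw [pv_loop_absent references _ hpos locais_RAM none (-1) i hfa]
  | none =>
    have hall : ∀ x ∈ locais_RAM, x ∈ references := (pv_firstAbsent_none references locais_RAM).mp hfa
    have hposg : ∀ x ∈ locais_RAM, PySem.Dict.get?
        ((PySem.List.enumerate references 0).foldl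
          (fun d p => if PySem.Dict.contains d p.2 then d else PySem.Dict.insert d p.2 p.1)
          PySem.Dict.empty) x = some (pvIdx references x) := by
      intro x hx
      rw [hpos x]
      rcases Option.isSome_iff_exists.mp ((PySem.List.index?_isSome_iff references x).mpr (hall x hx)) with ⟨k, hk⟩
      unfold pvIdx
      rw [hk]
      simp
    cases locais_RAM with
    | nil => exact absurd rfl hpre
    | cons a t =>
      have hall' : ∀ x ∈ a :: t, x ∈ references := hall
      have ha : a ∈ references := hall' a (by simp)
      have hga : 0 ≤ pvIdx references a := pv_idx_nonneg ha
      -- A side: posicao = map pvIdx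
      rw [pv_posicao references (a :: t)]
      simp only [List.map_cons]
      rw [PySem.List.max?_id_cons]
      -- the max is attained, so index? succeeds
      have hmem : (t.map (pvIdx references)).foldl max (pvIdx references a)
          ∈ pvIdx references a :: t.map (pvIdx references) := by
        have := PySem.List.max?_mem (xs := pvIdx references a :: t.map (pvIdx references))
          (key := fun y => y) (m := (t.map (pvIdx references)).foldl max (pvIdx references a))
        exact this (PySem.List.max?_id_cons _ _)
      rcases Option.isSome_iff_exists.mp
        ((PySem.List.index?_isSome_iff _ _).mpr hmem) with ⟨k, hk⟩
      simp only [hk]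
      have hk' : PySem.List.index? ((a :: t).map (pvIdx references))
          ((t.map (pvIdx references)).foldl max (pvIdx references a)) = some k := by
        simpa using hk
      rw [pv_index_map_find (pvIdx references) (a :: t) _ k hk']
      -- B side
      rw [pv_loop_eq _ (pvIdx references) (a :: t) none (-1) hposg ⟨a, by simp, by omega⟩]
      simp only [List.map_cons, List.foldl_cons]
      have : max (-1 : Int) (pvIdx references a) = pvIdx references a := max_eq_right (by omega)
      rw [this]
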